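-- pv_equiv track=rewrite | github.com/k9mil/lumen | backend/app/pipeline/scoring.py | _sic_matches_class
-- ===== SOURCE A (Python) =====
-- def _sic_matches_class(sic_codes: list[str], property_class: str) -> bool:
--     """Check if SIC codes are broadly compatible with property class."""
--     class_lower = property_class.lower()
--
--     retail_sics = any(s.startswith("47") for s in sic_codes)
--     food_sics = any(s.startswith("56") for s in sic_codes)
--     office_sics = any(
--         s.startswith(("62", "63", "64", "65", "66", "69", "70", "71", "72", "73"))
--         for s in sic_codes
--     )
--
--     if "retail" in class_lower and retail_sics:
--         return True
--     if "restaurant" in class_lower and food_sics: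
--         return True
--     if "food" in class_lower and food_sics:
--         return True
--     if "office" in class_lower and office_sics:
--         return True
--     if "bar" in class_lower and food_sics:
--         return True
--
--     return False  # Default: flag when SIC doesn't match known categories
-- ===== SOURCE B (Python) =====
-- _OFFICE_PREFIXES = ("62", "63", "64", "65", "66", "69", "70", "71", "72", "73")
--
--
-- def _keywords_for(code):
--     """Map a single SIC code to the property-class keywords it is compatible with."""
--     kws = []
--     if code.startswith("47"):
--         kws.append("retail")
--     if code.startswith("56"):
--         kws.extend(("restaurant", "food", "bar"))
--     if code.startswith(_OFFICE_PREFIXES):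
--         kws.append("office")
--     return kws
--
--
-- def _sic_matches_class(sic_codes: list[str], property_class: str) -> bool:
--     """Check if SIC codes are broadly compatible with property class."""
--     class_lower = property_class.lower()
--     return any(
--         kw in class_lower for code in sic_codes for kw in _keywords_for(code)
--     )
-- ===== Notes on version B (the rewrite author's own statement) =====
-- stated objective: alternative
-- what changed: Inverted the loop structure: instead of precomputing three whole-list category flags and testing them in five keyword branches, B makes a single pass over the SIC codes, maps each code by its prefix to the list of compatible class keywords, and returns as soon as one such keyword occurs in the lowercased class.
import Mathlib
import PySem

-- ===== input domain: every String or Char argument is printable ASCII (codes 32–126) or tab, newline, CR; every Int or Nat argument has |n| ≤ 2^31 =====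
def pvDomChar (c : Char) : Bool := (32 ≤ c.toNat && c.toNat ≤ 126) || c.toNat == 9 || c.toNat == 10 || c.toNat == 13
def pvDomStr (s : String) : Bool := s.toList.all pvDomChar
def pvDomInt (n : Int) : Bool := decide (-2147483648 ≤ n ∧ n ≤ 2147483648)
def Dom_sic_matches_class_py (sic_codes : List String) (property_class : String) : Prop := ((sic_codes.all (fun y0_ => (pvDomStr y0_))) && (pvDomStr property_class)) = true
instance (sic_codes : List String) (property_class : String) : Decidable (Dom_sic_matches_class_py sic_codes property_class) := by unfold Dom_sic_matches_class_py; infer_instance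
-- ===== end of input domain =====

-- B inverts A's loop structure: one pass over the SIC codes mapping each code's prefix to compatible class keywords, instead of A's three precomputed whole-list flags tested by five keyword branches; objective: alternative.


-- ===== PORT A =====
def sic_matches_class_py (sic_codes : List String) (property_class : String) : Bool :=
  let class_lower := PySem.Str.lower property_class
  let retail_sics := sic_codes.any (fun s => PySem.Str.startswith s "47")
  let food_sics := sic_codes.any (fun s => PySem.Str.startswith s "56")
  let office_sics := sic_codes.any (fun s =>
    ["62", "63", "64", "65", "66", "69", "70", "71", "72", "73"].any
      (fun p => PySem.Str.startswith s p))
  if PySem.Str.isIn "retail" class_lower && retail_sics then true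
  else if PySem.Str.isIn "restaurant" class_lower && food_sics then true
  else if PySem.Str.isIn "food" class_lower && food_sics then true
  else if PySem.Str.isIn "office" class_lower && office_sics then true
  else if PySem.Str.isIn "bar" class_lower && food_sics then true
  else false

-- ===== PORT B =====
def officePrefixes : List String :=
  ["62", "63", "64", "65", "66", "69", "70", "71", "72", "73"]

-- per-code classification: which class keywords this single SIC code is compatible with
def keywordsFor (code : String) : List String :=
  let kws : List String := []
  let kws := if PySem.Str.startswith code "47" then kws ++ ["retail"] else kws
  let kws := if PySem.Str.startswith code "56" then kws ++ ["restaurant", "food", "bar"] else kws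
  let kws := if officePrefixes.any (fun p => PySem.Str.startswith code p) then kws ++ ["office"] else kws
  kws

def sic_matches_class_py_alt (sic_codes : List String) (property_class : String) : Bool :=
  let class_lower := PySem.Str.lower property_class
  sic_codes.any (fun code => (keywordsFor code).any (fun kw => PySem.Str.isIn kw class_lower))

-- ===== PRECONDITION & SPEC =====
def Spec_sic_matches_class_py (sic_codes : List String) (property_class : String) (out : Bool) : Prop := out = sic_matches_class_py_alt sic_codes property_class
instance (sic_codes : List String) (property_class : String) (out : Bool) : Decidable (Spec_sic_matches_class_py sic_codes property_class out) := by unfold Spec_sic_matches_class_py; infer_instance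

-- ===== CLAIM =====
def Claim_equal_sic_matches_class_py : Prop := ∀ (sic_codes : List String) (property_class : String), Dom_sic_matches_class_py sic_codes property_class → Spec_sic_matches_class_py sic_codes property_class (sic_matches_class_py sic_codes property_class)

-- ===== LEMMAS AND PROOFS =====

-- one code's keyword list, tested with any predicate f, is the disjunction of (f keyword && this code has the prefix)
theorem keywordsFor_any (code : String) (f : String → Bool) :
    (keywordsFor code).any f
      = (f "retail" && PySem.Str.startswith code "47"
         || (f "restaurant" && PySem.Str.startswith code "56"
         || (f "food" && PySem.Str.startswith code "56"
         || (f "office" && officePrefixes.any (fun p => PySem.Str.startswith code p)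
         || f "bar" && PySem.Str.startswith code "56")))) := by
  unfold keywordsFor
  cases PySem.Str.startswith code "47" <;>
    cases PySem.Str.startswith code "56" <;>
      cases officePrefixes.any (fun p => PySem.Str.startswith code p) <;>
        simp [List.any_cons, List.any_nil] <;>
          cases f "retail" <;> cases f "restaurant" <;> cases f "food" <;>
            cases f "office" <;> cases f "bar" <;> rfl

-- B's single pass over the codes equals the disjunction of A's per-keyword whole-list flags
theorem loop_eq (f : String → Bool) (l : List String) :
    l.any (fun code => (keywordsFor code).any f)
      = (f "retail" && l.any (fun s => PySem.Str.startswith s "47")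
         || (f "restaurant" && l.any (fun s => PySem.Str.startswith s "56")
         || (f "food" && l.any (fun s => PySem.Str.startswith s "56")
         || (f "office" && l.any (fun s => officePrefixes.any (fun p => PySem.Str.startswith s p))
         || f "bar" && l.any (fun s => PySem.Str.startswith s "56"))))) := by
  induction l with
  | nil => simp
  | cons s t ih =>
    simp only [List.any_cons]
    rw [ih, keywordsFor_any]
    generalize f "retail" = a
    generalize f "restaurant" = b
    generalize f "food" = c
    generalize f "office" = d
    generalize f "bar" = e
    generalize PySem.Str.startswith s "47" = p
    generalize PySem.Str.startswith s "56" = q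
    generalize (officePrefixes.any fun pre => PySem.Str.startswith s pre) = r
    generalize (t.any fun s => PySem.Str.startswith s "47") = u
    generalize (t.any fun s => PySem.Str.startswith s "56") = v
    generalize (t.any fun s => officePrefixes.any fun pre => PySem.Str.startswith s pre) = w
    revert a b c d e p q r u v w
    decide

-- A's five-branch if-chain is the same disjunction
theorem sic_chain_eq (a b c d e x y z : Bool) :
    (if a && x then true
     else if b && y then true
     else if c && y then true
     else if d && z then true
     else if e && y then true
     else false)
      = (a && x || (b && y || (c && y || (d && z || e && y)))) := by
  cases a <;> cases b <;> cases c <;> cases d <;> cases e <;> cases x <;> cases y <;> cases z <;> rfl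

-- ===== VERDICT =====
theorem sic_matches_class_py_spec : Claim_equal_sic_matches_class_py := by
  intro sic_codes property_class _
  unfold Spec_sic_matches_class_py sic_matches_class_py sic_matches_class_py_alt
  rw [loop_eq, sic_chain_eq]
  rfl
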